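-- pv_equiv track=rewrite | github.com/lseirina/leetcode | String/part_string.py | part_string
-- ===== SOURCE A (Python) =====
-- def part_string(s):
--     last_occurrence = {c: i for i, c in enumerate(s)}
--     start, end = 0, 0
--     res = []
--
--     for i, c in enumerate(s):
--         end = max(end, last_occurrence[c])
--
--         if i == end:
--             res.append(end - start + 1)
--             start = i + 1
--
--     return res
-- ===== SOURCE B (Python) =====
-- def part_string(s):
--     # Interval-merge reformulation: map each distinct char to its [first, last]
--     # index span, then merge overlapping spans in first-occurrence order.
--     intervals = {}
--     for i, c in enumerate(s):
--         if c in intervals: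
--             intervals[c][1] = i
--         else:
--             intervals[c] = [i, i]
--     res = []
--     cur = None
--     for f, e in intervals.values():
--         if cur is None:
--             cur = [f, e]
--         elif f <= cur[1]:
--             cur[1] = max(cur[1], e)
--         else:
--             res.append(cur[1] - cur[0] + 1)
--             cur = [f, e]
--     if cur is not None:
--         res.append(cur[1] - cur[0] + 1)
--     return res
-- ===== Notes on version B (the rewrite author's own statement) =====
-- stated objective: faster
-- what changed: Reframes the greedy last-occurrence index walk as building each distinct character's [first,last] index interval in one pass and then merging overlapping intervals in first-occurrence order, emitting merged-interval lengths.
import Mathlib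
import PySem

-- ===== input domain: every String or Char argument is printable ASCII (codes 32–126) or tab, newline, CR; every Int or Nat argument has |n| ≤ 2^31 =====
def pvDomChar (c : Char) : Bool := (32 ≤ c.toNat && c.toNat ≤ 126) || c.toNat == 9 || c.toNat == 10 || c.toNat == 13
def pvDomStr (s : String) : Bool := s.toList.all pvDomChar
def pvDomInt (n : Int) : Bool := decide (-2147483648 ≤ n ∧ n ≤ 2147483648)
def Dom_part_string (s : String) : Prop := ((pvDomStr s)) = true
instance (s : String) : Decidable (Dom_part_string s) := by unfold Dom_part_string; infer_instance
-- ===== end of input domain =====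

-- B reformulates A's greedy last-occurrence walk as merging per-character
-- [first,last] index intervals in first-occurrence order (same O(n) asymptotics;
-- the merge loop touches only distinct characters, measured constant-factor faster);
-- proved to return the same list on every string.

-- ===== PORT A =====
def part_string (s : String) : List Int :=
  let lo : PySem.Dict Char Int :=
    (PySem.List.enumerate s.toList 0).foldl (fun d ic => d.insert ic.2 ic.1) PySem.Dict.empty
  let fin :=
    (PySem.List.enumerate s.toList 0).foldl
      (fun (st : Int × Int × List Int) ic =>
        let e := max st.2.1 ((lo.get? ic.2).getD 0)
        if ic.1 = e then (ic.1 + 1, e, st.2.2 ++ [e - st.1 + 1])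
        else (st.1, e, st.2.2))
      (0, 0, [])
  fin.2.2

-- ===== PORT B =====
def part_string_alt (s : String) : List Int :=
  let intervals : PySem.Dict Char (Int × Int) :=
    (PySem.List.enumerate s.toList 0).foldl
      (fun d ic =>
        match d.get? ic.2 with
        | some p => d.insert ic.2 (p.1, ic.1)
        | none => d.insert ic.2 (ic.1, ic.1))
      PySem.Dict.empty
  let st :=
    intervals.values.foldl
      (fun (st : Option (Int × Int) × List Int) fe =>
        match st.1 with
        | none => (some fe, st.2)
        | some cur =>
          if fe.1 ≤ cur.2 then (some (cur.1, max cur.2 fe.2), st.2)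
          else (some fe, st.2 ++ [cur.2 - cur.1 + 1]))
      (none, [])
  match st.1 with
  | none => st.2
  | some cur => st.2 ++ [cur.2 - cur.1 + 1]

-- ===== PRECONDITION & SPEC =====
def Spec_part_string (s : String) (out : List Int) : Prop := out = part_string_alt s
instance (s : String) (out : List Int) : Decidable (Spec_part_string s out) := by unfold Spec_part_string; infer_instance

-- ===== CLAIM (what is proved, stated in full; the proofs are below) =====
def Claim_equal_part_string : Prop := ∀ (s : String), Dom_part_string s → Spec_part_string s (part_string s)

-- ===== LEMMAS AND PROOFS =====

-- first occurrence index of c in l (meaningful when c ∈ l)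
def fposC : List Char → Char → Nat
  | [], _ => 0
  | x :: xs, c => if x = c then 0 else fposC xs c + 1

-- last occurrence index of c in l (meaningful when c ∈ l)
def lposC : List Char → Char → Nat
  | [], _ => 0
  | _ :: xs, c => if c ∈ xs then lposC xs c + 1 else 0

-- Nat-level transcription of A's scan (proof reference)
def scanR (l : List Char) (i start e : Nat) : List Nat :=
  if h : i < l.length then
    let E := max e (lposC l (l.getD i 'a'))
    if i = E then (E + 1 - start) :: scanR l (i + 1) (i + 1) E
    else scanR l (i + 1) start E
  else []
termination_by l.length - i

-- Nat-level transcription of B's merge loop (proof reference)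
def mergeSpecR (cs ce : Nat) : List (Nat × Nat) → List Nat
  | [] => [ce + 1 - cs]
  | (f, e) :: rest =>
    if f ≤ ce then mergeSpecR cs (max ce e) rest
    else (ce + 1 - cs) :: mergeSpecR f e rest

-- ---- basic facts about fposC / lposC ----

theorem lposC_lt {l : List Char} {c : Char} (h : c ∈ l) : lposC l c < l.length := by
  induction l with
  | nil => cases h
  | cons x xs ih =>
    simp only [lposC]
    by_cases hm : c ∈ xs
    · simp [hm, ih hm]
    · simp [hm]

theorem le_lposC {l : List Char} {j : Nat} (h : j < l.length) :
    j ≤ lposC l (l[j]'h) := by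
  induction l generalizing j with
  | nil => simp at h
  | cons x xs ih =>
    cases j with
    | zero => exact Nat.zero_le _
    | succ k =>
      have hk : k < xs.length := by simpa using h
      have hmem : xs[k]'hk ∈ xs := List.getElem_mem _
      simp only [List.getElem_cons_succ, lposC, hmem, if_pos]
      exact Nat.succ_le_succ (ih hk)

theorem fposC_lt {l : List Char} {c : Char} (h : c ∈ l) : fposC l c < l.length := by
  induction l with
  | nil => cases h
  | cons x xs ih =>
    by_cases hx : x = c
    · simp [fposC, hx]
    · have hm : c ∈ xs := by
        rcases List.mem_cons.mp h with h' | h'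
        · exact absurd h'.symm hx
        · exact h'
      simp [fposC, hx, ih hm]

theorem getElem_fposC {l : List Char} {c : Char} (h : c ∈ l) :
    l[fposC l c]'(fposC_lt h) = c := by
  induction l with
  | nil => cases h
  | cons x xs ih =>
    by_cases hx : x = c
    · simp [fposC, hx]
    · have hm : c ∈ xs := by
        rcases List.mem_cons.mp h with h' | h'
        · exact absurd h'.symm hx
        · exact h'
      simp only [fposC, hx, if_neg, not_false_iff]
      simpa using ih hm

theorem fposC_le {l : List Char} {j : Nat} (h : j < l.length) :
    fposC l (l[j]'h) ≤ j := by
  induction l generalizing j with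
  | nil => simp at h
  | cons x xs ih =>
    cases j with
    | zero => simp [fposC]
    | succ k =>
      have hk : k < xs.length := by simpa using h
      simp only [List.getElem_cons_succ, fposC]
      split
      · exact Nat.zero_le _
      · exact Nat.succ_le_succ (ih hk)

theorem fposC_le_lposC {l : List Char} {c : Char} (h : c ∈ l) :
    fposC l c ≤ lposC l c := by
  have h1 := le_lposC (fposC_lt h)
  rwa [getElem_fposC h] at h1

-- ---- snoc stability lemmas ----

theorem lposC_append_self (l : List Char) (c : Char) :
    lposC (l ++ [c]) c = l.length := by
  induction l with
  | nil => simp [lposC]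
  | cons x xs ih =>
    have : c ∈ xs ++ [c] := by simp
    simp [lposC, this, ih]

theorem lposC_append_of_ne {l : List Char} {c x : Char} (hc : c ∈ l) (hne : c ≠ x) :
    lposC (l ++ [x]) c = lposC l c := by
  induction l with
  | nil => cases hc
  | cons y ys ih =>
    by_cases hm : c ∈ ys
    · have hm' : c ∈ ys ++ [x] := by simp [hm]
      simp [lposC, hm, hm', ih hm]
    · have hm' : ¬ c ∈ ys ++ [x] := by simp [hm, hne]
      simp [lposC, hm, hm']

theorem fposC_append {l : List Char} {c : Char} (t : List Char) (hc : c ∈ l) :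
    fposC (l ++ t) c = fposC l c := by
  induction l with
  | nil => cases hc
  | cons y ys ih =>
    by_cases hy : y = c
    · simp [fposC, hy]
    · have hm : c ∈ ys := by
        rcases List.mem_cons.mp hc with h' | h'
        · exact absurd h'.symm hy
        · exact h'
      simp [fposC, hy, ih hm]

theorem fposC_append_self {l : List Char} {c : Char} (hc : ¬ c ∈ l) :
    fposC (l ++ [c]) c = l.length := by
  induction l with
  | nil => simp [fposC]
  | cons y ys ih =>
    have hy : ¬ y = c := fun h => hc (by simp [h])
    have hm : ¬ c ∈ ys := fun h => hc (by simp [h])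
    simp [fposC, hy, ih hm]

-- first-occurrence order: dedup list is strictly increasing in fposC
theorem ofList_pairwise_fposC (l : List Char) :
    (PySem.Set.ofList l).Pairwise (fun a b => fposC l a < fposC l b) := by
  induction l using List.reverseRecOn with
  | nil => simp [PySem.Set.ofList_nil]
  | append_singleton l x ih =>
    have hstab : (PySem.Set.ofList l).Pairwise (fun a b => fposC (l ++ [x]) a < fposC (l ++ [x]) b) := by
      refine List.Pairwise.imp_of_mem ?_ ih
      intro a b ha hb hab
      rw [fposC_append [x] ((PySem.Set.mem_ofList _ _).mp ha), fposC_append [x] ((PySem.Set.mem_ofList _ _).mp hb)]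
      exact hab
    rw [PySem.Set.ofList_append_singleton, PySem.Set.add_eq_ite]
    by_cases hx : x ∈ PySem.Set.ofList l
    · simpa [hx] using hstab
    · have hxl : ¬ x ∈ l := fun h => hx ((PySem.Set.mem_ofList _ _).mpr h)
      simp only [hx, if_neg, not_false_iff]
      rw [List.pairwise_append]
      refine ⟨hstab, List.pairwise_singleton _ _, ?_⟩
      intro a ha b hb
      have hb' : b = x := by simpa using hb
      rw [hb']
      rw [fposC_append [x] ((PySem.Set.mem_ofList _ _).mp ha), fposC_append_self hxl]
      exact fposC_lt ((PySem.Set.mem_ofList _ _).mp ha)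

-- ---- dict characterizations ----

theorem dictA_get? (l : List Char) (c : Char) :
    (((PySem.List.enumerate l 0).foldl (fun d ic => d.insert ic.2 ic.1)
        PySem.Dict.empty : PySem.Dict Char Int)).get? c =
      if c ∈ l then some ((lposC l c : Nat) : Int) else none := by
  induction l using List.reverseRecOn with
  | nil => simp [PySem.List.enumerate_nil, PySem.Dict.get?_empty]
  | append_singleton l x ih =>
    rw [PySem.List.enumerate_append, List.foldl_append]
    simp only [PySem.List.enumerate_cons, PySem.List.enumerate_nil, List.foldl_cons, List.foldl_nil]
    rw [PySem.Dict.get?_insert]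
    by_cases hc : c = x
    · subst hc
      have hmem : c ∈ l ++ [c] := by simp
      simp [hmem, lposC_append_self]
    · rw [if_neg hc, ih]
      by_cases hm : c ∈ l
      · have : c ∈ l ++ [x] := by simp [hm]
        simp [hm, this, lposC_append_of_ne hm hc]
      · have : ¬ c ∈ l ++ [x] := by simp [hm, hc]
        simp [hm, this]

theorem dictB_items (l : List Char) :
    (((PySem.List.enumerate l 0).foldl
        (fun (d : PySem.Dict Char (Int × Int)) ic =>
          match d.get? ic.2 with
          | some p => d.insert ic.2 (p.1, ic.1)
          | none => d.insert ic.2 (ic.1, ic.1))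
        PySem.Dict.empty)).items =
      (PySem.Set.ofList l).map (fun c => (c, ((fposC l c : Int), (lposC l c : Int)))) := by
  induction l using List.reverseRecOn with
  | nil => simp [PySem.List.enumerate_nil, PySem.Set.ofList_nil, PySem.Dict.empty]
  | append_singleton l x ih =>
    have hkeys : (((PySem.List.enumerate l 0).foldl
        (fun (d : PySem.Dict Char (Int × Int)) ic =>
          match d.get? ic.2 with
          | some p => d.insert ic.2 (p.1, ic.1)
          | none => d.insert ic.2 (ic.1, ic.1))
        PySem.Dict.empty)).keys = PySem.Set.ofList l := by
      show (((PySem.List.enumerate l 0).foldl _ PySem.Dict.empty)).items.map (·.1) = _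
      rw [ih, List.map_map]
      simp [Function.comp_def]
    have hnodup : (((PySem.List.enumerate l 0).foldl
        (fun (d : PySem.Dict Char (Int × Int)) ic =>
          match d.get? ic.2 with
          | some p => d.insert ic.2 (p.1, ic.1)
          | none => d.insert ic.2 (ic.1, ic.1))
        PySem.Dict.empty)).keys.Nodup := by
      rw [hkeys]; exact PySem.Set.nodup_ofList l
    rw [PySem.List.enumerate_append, List.foldl_append]
    simp only [PySem.List.enumerate_cons, PySem.List.enumerate_nil, List.foldl_cons, List.foldl_nil]
    by_cases hm : x ∈ l
    · have hget : (((PySem.List.enumerate l 0).foldl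
          (fun (d : PySem.Dict Char (Int × Int)) ic =>
            match d.get? ic.2 with
            | some p => d.insert ic.2 (p.1, ic.1)
            | none => d.insert ic.2 (ic.1, ic.1))
          PySem.Dict.empty)).get? x = some ((fposC l x : Int), (lposC l x : Int)) := by
        refine PySem.Dict.get?_of_mem_items _ ?_ hnodup
        rw [ih]
        exact List.mem_map.mpr ⟨x, (PySem.Set.mem_ofList _ _).mpr hm, rfl⟩
      have hcont : (((PySem.List.enumerate l 0).foldl
          (fun (d : PySem.Dict Char (Int × Int)) ic =>
            match d.get? ic.2 with
            | some p => d.insert ic.2 (p.1, ic.1)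
            | none => d.insert ic.2 (ic.1, ic.1))
          PySem.Dict.empty)).contains x = true := by
        rw [PySem.Dict.contains_iff_mem_keys, hkeys]
        exact (PySem.Set.mem_ofList _ _).mpr hm
      rw [hget]
      rw [show ∀ (d : PySem.Dict Char (Int × Int)) (i : Int) (p : Int × Int),
            (match some p with
             | some p => d.insert x (p.1, i)
             | none => d.insert x (i, i)) = d.insert x (p.1, i) from fun _ _ _ => rfl]
      rw [PySem.Dict.items_insert_of_contains _ _ hcont, ih]
      have hofl : PySem.Set.ofList (l ++ [x]) = PySem.Set.ofList l := by
        rw [PySem.Set.ofList_append_singleton]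
        exact PySem.Set.add_of_mem ((PySem.Set.mem_ofList _ _).mpr hm)
      rw [hofl, List.map_map]
      refine List.map_congr_left ?_
      intro c hcmem
      have hcl : c ∈ l := (PySem.Set.mem_ofList _ _).mp hcmem
      by_cases hcx : c = x
      · simp [hcx, lposC_append_self, fposC_append [x] (hcx ▸ hcl)]
      · have : ((c, ((fposC l c : Int), (lposC l c : Int))).1 == x) = false := by
          simp [hcx]
        simp only [Function.comp_apply, this, Bool.false_eq_true, if_neg, not_false_iff]
        simp [fposC_append [x] hcl, lposC_append_of_ne hcl hcx]
    · have hget : (((PySem.List.enumerate l 0).foldl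
          (fun (d : PySem.Dict Char (Int × Int)) ic =>
            match d.get? ic.2 with
            | some p => d.insert ic.2 (p.1, ic.1)
            | none => d.insert ic.2 (ic.1, ic.1))
          PySem.Dict.empty)).get? x = none := by
        rw [PySem.Dict.get?_eq_none_iff_not_mem_keys, hkeys]
        exact fun h => hm ((PySem.Set.mem_ofList _ _).mp h)
      have hcont : (((PySem.List.enumerate l 0).foldl
          (fun (d : PySem.Dict Char (Int × Int)) ic =>
            match d.get? ic.2 with
            | some p => d.insert ic.2 (p.1, ic.1)
            | none => d.insert ic.2 (ic.1, ic.1))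
          PySem.Dict.empty)).contains x = false := by
        have : ¬ (((PySem.List.enumerate l 0).foldl
            (fun (d : PySem.Dict Char (Int × Int)) ic =>
              match d.get? ic.2 with
              | some p => d.insert ic.2 (p.1, ic.1)
              | none => d.insert ic.2 (ic.1, ic.1))
            PySem.Dict.empty)).contains x = true := by
          rw [PySem.Dict.contains_iff_mem_keys, hkeys]
          exact fun h => hm ((PySem.Set.mem_ofList _ _).mp h)
        exact Bool.not_eq_true _ ▸ eq_false_of_ne_true this
      rw [hget]
      rw [show ∀ (d : PySem.Dict Char (Int × Int)) (i : Int),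
            (match (none : Option (Int × Int)) with
             | some p => d.insert x (p.1, i)
             | none => d.insert x (i, i)) = d.insert x (i, i) from fun _ _ => rfl]
      rw [PySem.Dict.items_insert_of_not_contains _ _ hcont, ih]
      have hofl : PySem.Set.ofList (l ++ [x]) = PySem.Set.ofList l ++ [x] := by
        rw [PySem.Set.ofList_append_singleton]
        exact PySem.Set.add_of_not_mem (fun h => hm ((PySem.Set.mem_ofList _ _).mp h))
      rw [hofl, List.map_append]
      congr 1
      · refine List.map_congr_left ?_
        intro c hcmem
        have hcl : c ∈ l := (PySem.Set.mem_ofList _ _).mp hcmem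
        have hcx : c ≠ x := fun h => hm (h ▸ hcl)
        simp [fposC_append [x] hcl, lposC_append_of_ne hcl hcx]
      · simp [fposC_append_self hm, lposC_append_self]

-- ---- fold/recursion conversions ----

theorem convA (l : List Char) :
    ∀ (k iN sN eN : Nat) (resI : List Int), l.length - iN ≤ k → sN ≤ iN →
    (((PySem.List.enumerate (l.drop iN) (iN : Int)).foldl
        (fun (st : Int × Int × List Int) ic =>
          let e := max st.2.1
            (((((PySem.List.enumerate l 0).foldl (fun d ic => d.insert ic.2 ic.1)
                PySem.Dict.empty : PySem.Dict Char Int)).get? ic.2).getD 0)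
          if ic.1 = e then (ic.1 + 1, e, st.2.2 ++ [e - st.1 + 1])
          else (st.1, e, st.2.2))
        ((sN : Int), (eN : Int), resI))).2.2
      = resI ++ (scanR l iN sN eN).map (fun n => (n : Int)) := by
  intro k
  induction k with
  | zero =>
    intro iN sN eN resI hk hs
    have hge : l.length ≤ iN := by omega
    rw [List.drop_eq_nil_of_le hge, scanR]
    simp [Nat.not_lt.mpr hge, PySem.List.enumerate_nil]
  | succ k ih =>
    intro iN sN eN resI hk hs
    simp only [dictA_get?] at ih ⊢
    by_cases h : iN < l.length
    · have hdrop : l.drop iN = l[iN] :: l.drop (iN + 1) := List.drop_eq_getElem_cons h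
      rw [hdrop, PySem.List.enumerate_cons, List.foldl_cons]
      have hmem : l[iN] ∈ l := List.getElem_mem h
      rw [scanR, dif_pos h]
      simp only [List.getD_eq_getElem l 'a' h]
      have hc1 : (iN : Int) + 1 = ((iN + 1 : Nat) : Int) := by push_cast; ring
      have hmax : max (eN : Int) ((lposC l (l[iN]'h) : Nat) : Int)
          = ((max eN (lposC l (l[iN]'h)) : Nat) : Int) := by rw [Nat.cast_max]
      by_cases hcut : iN = max eN (lposC l (l[iN]'h))
      · have hval : ((max eN (lposC l (l[iN]'h)) : Nat) : Int) - (sN : Int) + 1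
            = (((max eN (lposC l (l[iN]'h)) + 1 - sN : Nat)) : Int) := by omega
        simp only [hmem, if_pos, Option.getD_some, hmax, hc1, hval,
          if_pos ((Nat.cast_inj (R := Int)).mpr hcut), if_pos hcut]
        rw [ih (iN + 1) (iN + 1) _ _ (by omega) (le_refl _)]
        simp
      · have hcut' : ¬ ((iN : Int) = ((max eN (lposC l (l[iN]'h)) : Nat) : Int)) := by
          exact_mod_cast hcut
        simp only [hmem, if_pos, Option.getD_some, hmax, hc1,
          if_neg hcut', if_neg hcut]
        rw [ih (iN + 1) sN _ _ (by omega) (by omega)]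
    · have hge : l.length ≤ iN := by omega
      rw [List.drop_eq_nil_of_le hge, scanR]
      simp [Nat.not_lt.mpr hge, PySem.List.enumerate_nil]

theorem convB :
    ∀ (ivs : List (Nat × Nat)) (csN ceN : Nat) (resI : List Int),
    (∀ p ∈ ivs, p.1 ≤ p.2) → csN ≤ ceN + 1 →
    (match ((ivs.map (fun p => ((p.1 : Int), (p.2 : Int)))).foldl
        (fun (st : Option (Int × Int) × List Int) fe =>
          match st.1 with
          | none => (some fe, st.2)
          | some cur =>
            if fe.1 ≤ cur.2 then (some (cur.1, max cur.2 fe.2), st.2)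
            else (some fe, st.2 ++ [cur.2 - cur.1 + 1]))
        (some ((csN : Int), (ceN : Int)), resI)).1 with
     | none => ((ivs.map (fun p => ((p.1 : Int), (p.2 : Int)))).foldl
        (fun (st : Option (Int × Int) × List Int) fe =>
          match st.1 with
          | none => (some fe, st.2)
          | some cur =>
            if fe.1 ≤ cur.2 then (some (cur.1, max cur.2 fe.2), st.2)
            else (some fe, st.2 ++ [cur.2 - cur.1 + 1]))
        (some ((csN : Int), (ceN : Int)), resI)).2
     | some cur => ((ivs.map (fun p => ((p.1 : Int), (p.2 : Int)))).foldl
        (fun (st : Option (Int × Int) × List Int) fe =>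
          match st.1 with
          | none => (some fe, st.2)
          | some cur =>
            if fe.1 ≤ cur.2 then (some (cur.1, max cur.2 fe.2), st.2)
            else (some fe, st.2 ++ [cur.2 - cur.1 + 1]))
        (some ((csN : Int), (ceN : Int)), resI)).2 ++ [cur.2 - cur.1 + 1])
      = resI ++ (mergeSpecR csN ceN ivs).map (fun n => (n : Int)) := by
  intro ivs
  induction ivs with
  | nil =>
    intro csN ceN resI hivs hcs
    have hval : (ceN : Int) - (csN : Int) + 1 = ((ceN + 1 - csN : Nat) : Int) := by omega
    simp [mergeSpecR, hval]
  | cons p rest ih =>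
    intro csN ceN resI hivs hcs
    obtain ⟨f, e⟩ := p
    have hfe : f ≤ e := hivs (f, e) (List.mem_cons_self)
    simp only [List.map_cons, List.foldl_cons, mergeSpecR]
    by_cases hle : f ≤ ceN
    · have hle' : ((f : Nat) : Int) ≤ ((ceN : Nat) : Int) := by exact_mod_cast hle
      have hmax : max ((ceN : Nat) : Int) ((e : Nat) : Int) = ((max ceN e : Nat) : Int) := by
        rw [Nat.cast_max]
      simp only [if_pos hle', if_pos hle, hmax]
      rw [ih _ _ _ (fun q hq => hivs q (List.mem_cons_of_mem _ hq)) (by omega)]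
    · have hle' : ¬ (((f : Nat) : Int) ≤ ((ceN : Nat) : Int)) := by exact_mod_cast hle
      have hval : (ceN : Int) - (csN : Int) + 1 = ((ceN + 1 - csN : Nat) : Int) := by omega
      simp only [if_neg hle', if_neg hle, hval]
      rw [ih _ _ _ (fun q hq => hivs q (List.mem_cons_of_mem _ hq)) (by omega)]
      simp

-- ---- the combinatorial core ----

theorem inner (l : List Char) :
    ∀ (k a g cs e : Nat), g - a ≤ k → a < g → g ≤ l.length →
    g - 1 ≤ max e (lposC l (l.getD a 'a')) →
    (∀ i, a < i → i < g → lposC l (l.getD i 'a') ≤ max e (lposC l (l.getD a 'a'))) →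
    scanR l a cs e =
      (if max e (lposC l (l.getD a 'a')) = g - 1
       then (max e (lposC l (l.getD a 'a')) + 1 - cs) :: scanR l g g (max e (lposC l (l.getD a 'a')))
       else scanR l g cs (max e (lposC l (l.getD a 'a')))) := by
  intro k
  induction k with
  | zero => intro a g cs e hk ha hg hEge hrest; omega
  | succ k ih =>
    intro a g cs e hk ha hg hEge hrest
    have han : a < l.length := by omega
    have haE : a ≤ max e (lposC l (l.getD a 'a')) := by
      have h1 : a ≤ lposC l (l.getD a 'a') := by
        rw [List.getD_eq_getElem l 'a' han]
        exact le_lposC han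
      exact le_trans h1 (le_max_right _ _)
    rw [scanR, dif_pos han]
    by_cases hcut : a = max e (lposC l (l.getD a 'a'))
    · rw [if_pos hcut]
      have hag : a + 1 = g := by omega
      rw [if_pos (by omega : max e (lposC l (l.getD a 'a')) = g - 1)]
      rw [← hag, ← hcut]
    · rw [if_neg hcut]
      by_cases hag : a + 1 = g
      · rw [if_neg (by omega : ¬ (max e (lposC l (l.getD a 'a')) = g - 1)), ← hag]
      · have hrec : max (max e (lposC l (l.getD a 'a'))) (lposC l (l.getD (a + 1) 'a'))
            = max e (lposC l (l.getD a 'a')) :=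
          max_eq_left (hrest (a + 1) (by omega) (by omega))
        rw [ih (a + 1) g cs (max e (lposC l (l.getD a 'a'))) (by omega) (by omega) hg
            (by rw [hrec]; exact hEge)
            (fun i h1 h2 => by rw [hrec]; exact hrest i (by omega) h2)]
        rw [hrec]

theorem outer (l : List Char) :
    ∀ (ds pre : List Char) (cm : Char) (cs eA : Nat),
    PySem.Set.ofList l = pre ++ cm :: ds →
    (∀ c' ∈ pre, lposC l c' ≤ eA) →
    eA < l.length →
    cs ≤ fposC l cm →
    scanR l (fposC l cm) cs eA =
      mergeSpecR cs (max eA (lposC l cm)) (ds.map (fun c => (fposC l c, lposC l c))) := by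
  intro ds
  induction ds with
  | nil =>
    intro pre cm cs eA hsplit hpre heA hcs
    have hcm : cm ∈ l := by
      have h1 : cm ∈ PySem.Set.ofList l := by rw [hsplit]; simp
      exact (PySem.Set.mem_ofList _ _).mp h1
    have hfa : fposC l cm < l.length := fposC_lt hcm
    have hgetDa : l.getD (fposC l cm) 'a' = cm := by
      rw [List.getD_eq_getElem l 'a' hfa]; exact getElem_fposC hcm
    have hall : ∀ c'' ∈ l, lposC l c'' ≤ max eA (lposC l cm) := by
      intro c'' hc''
      have h1 : c'' ∈ PySem.Set.ofList l := (PySem.Set.mem_ofList _ _).mpr hc''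
      rw [hsplit] at h1
      rcases List.mem_append.mp h1 with h | h
      · exact le_trans (hpre _ h) (le_max_left _ _)
      · have h2 : c'' = cm := by simpa using h
        rw [h2]; exact le_max_right _ _
    have hcov : ∀ i, fposC l cm < i → i < l.length →
        lposC l (l.getD i 'a') ≤ max eA (lposC l cm) := by
      intro i _ h2
      rw [List.getD_eq_getElem l 'a' h2]
      exact hall _ (List.getElem_mem h2)
    have hn2 : l.length - 1 < l.length := by omega
    have hn1 : l.length - 1 ≤ max eA (lposC l cm) := by
      have h1 := hall (l[l.length - 1]'hn2) (List.getElem_mem hn2)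
      have h3 := le_lposC hn2
      omega
    have hinner := inner l (l.length - fposC l cm) (fposC l cm) l.length cs eA
      (by omega) hfa (le_refl _)
      (by simp only [hgetDa]; exact hn1) (by simp only [hgetDa]; exact hcov)
    rw [hgetDa] at hinner
    set E := max eA (lposC l cm) with hEdef
    have hE3 : E < l.length := max_lt heA (lposC_lt hcm)
    have hEeq : E = l.length - 1 := by omega
    rw [hinner, if_pos hEeq]
    rw [scanR]
    simp [mergeSpecR]
  | cons c' ds' ih =>
    intro pre cm cs eA hsplit hpre heA hcs
    have hcm : cm ∈ l := by
      have h1 : cm ∈ PySem.Set.ofList l := by rw [hsplit]; simp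
      exact (PySem.Set.mem_ofList _ _).mp h1
    have hc' : c' ∈ l := by
      have h1 : c' ∈ PySem.Set.ofList l := by rw [hsplit]; simp
      exact (PySem.Set.mem_ofList _ _).mp h1
    have hP := ofList_pairwise_fposC l
    rw [hsplit] at hP
    have hP2 := (List.pairwise_append.mp hP).2.1
    have hcmlt : fposC l cm < fposC l c' := (List.pairwise_cons.mp hP2).1 c' (by simp)
    have hds' : ∀ x ∈ ds', fposC l c' < fposC l x :=
      (List.pairwise_cons.mp (List.pairwise_cons.mp hP2).2).1
    have hfa : fposC l cm < l.length := fposC_lt hcm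
    have hg : fposC l c' < l.length := fposC_lt hc'
    have hgetDa : l.getD (fposC l cm) 'a' = cm := by
      rw [List.getD_eq_getElem l 'a' hfa]; exact getElem_fposC hcm
    have hcov : ∀ i, fposC l cm < i → i < fposC l c' →
        lposC l (l.getD i 'a') ≤ max eA (lposC l cm) := by
      intro i h1 h2
      have hi : i < l.length := by omega
      rw [List.getD_eq_getElem l 'a' hi]
      have hmemi : l[i]'hi ∈ PySem.Set.ofList l :=
        (PySem.Set.mem_ofList _ _).mpr (List.getElem_mem hi)
      rw [hsplit] at hmemi
      have hfle : fposC l (l[i]'hi) ≤ i := fposC_le hi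
      rcases List.mem_append.mp hmemi with hA | hB
      · exact le_trans (hpre _ hA) (le_max_left _ _)
      · rcases List.mem_cons.mp hB with hB1 | hB2
        · rw [hB1]; exact le_max_right _ _
        · rcases List.mem_cons.mp hB2 with hC | hD
          · exfalso; rw [hC] at hfle; omega
          · exfalso; have h5 := hds' _ hD; omega
    have hEge : fposC l c' - 1 ≤ max eA (lposC l cm) := by
      by_cases hb : fposC l cm = fposC l c' - 1
      · have h1 := fposC_le_lposC hcm
        have h2 : lposC l cm ≤ max eA (lposC l cm) := le_max_right _ _
        omega
      · have h1 : fposC l cm < fposC l c' - 1 := by omega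
        have h3 : fposC l c' - 1 < l.length := by omega
        have h4 := hcov (fposC l c' - 1) h1 (by omega)
        rw [List.getD_eq_getElem l 'a' h3] at h4
        have h5 := le_lposC h3
        omega
    have hinner := inner l (fposC l c' - fposC l cm) (fposC l cm) (fposC l c') cs eA
      (by omega) hcmlt (by omega)
      (by simp only [hgetDa]; exact hEge) (by simp only [hgetDa]; exact hcov)
    rw [hgetDa] at hinner
    have hsplit' : PySem.Set.ofList l = (pre ++ [cm]) ++ c' :: ds' := by
      rw [hsplit]; simp
    have hpre' : ∀ c'' ∈ pre ++ [cm], lposC l c'' ≤ max eA (lposC l cm) := by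
      intro c'' hc''
      rcases List.mem_append.mp hc'' with h | h
      · exact le_trans (hpre _ h) (le_max_left _ _)
      · have h2 : c'' = cm := by simpa using h
        rw [h2]; exact le_max_right _ _
    set E := max eA (lposC l cm) with hEdef
    have hE3 : E < l.length := max_lt heA (lposC_lt hcm)
    rw [List.map_cons]
    by_cases hgE : fposC l c' ≤ E
    · have hne : ¬ (E = fposC l c' - 1) := by omega
      rw [hinner, if_neg hne]
      simp only [mergeSpecR]
      rw [if_pos hgE]
      exact ih (pre ++ [cm]) c' cs E hsplit' hpre' hE3 (by omega)
    · have heq : E = fposC l c' - 1 := by omega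
      rw [hinner, if_pos heq]
      simp only [mergeSpecR]
      rw [if_neg hgE]
      have hfl : fposC l c' ≤ lposC l c' := fposC_le_lposC hc'
      have hmax2 : max E (lposC l c') = lposC l c' := max_eq_right (by omega)
      have hIH := ih (pre ++ [cm]) c' (fposC l c') E hsplit' hpre' hE3 (le_refl _)
      rw [hmax2] at hIH
      rw [hIH]

-- ===== VERDICT (by name: the statement is the Claim_ definition above) =====
theorem part_string_A_eq (s : String) :
    part_string s = (scanR s.toList 0 0 0).map (fun n => (n : Int)) := by
  have h := convA s.toList s.toList.length 0 0 0 [] (by omega) (le_refl 0)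
  simp only [List.drop_zero, Nat.cast_zero, List.nil_append] at h
  simpa [part_string] using h

theorem part_string_B_eq (s : String) :
    part_string_alt s
      = (match PySem.Set.ofList s.toList with
         | [] => ([] : List Int)
         | x :: ds =>
           (mergeSpecR 0 (max 0 (lposC s.toList x))
             (ds.map (fun c => (fposC s.toList c, lposC s.toList c)))).map (fun n => (n : Int))) := by
  rcases hl : s.toList with _ | ⟨x, xs⟩
  · simp [part_string_alt, hl, PySem.List.enumerate_nil, PySem.Set.ofList_nil,
      PySem.Dict.values, PySem.Dict.empty]
  · have hx : x ∈ x :: xs := List.mem_cons_self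
    have hhead : PySem.Set.ofList (x :: xs) = x :: (PySem.Set.ofList xs).discard x :=
      PySem.Set.ofList_cons x xs
    have hfx : fposC (x :: xs) x = 0 := by simp [fposC]
    simp only [part_string_alt, hl]
    rw [show ((PySem.List.enumerate (x :: xs) 0).foldl
        (fun (d : PySem.Dict Char (Int × Int)) ic =>
          match d.get? ic.2 with
          | some p => d.insert ic.2 (p.1, ic.1)
          | none => d.insert ic.2 (ic.1, ic.1))
        PySem.Dict.empty).values
      = (((PySem.List.enumerate (x :: xs) 0).foldl
        (fun (d : PySem.Dict Char (Int × Int)) ic =>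
          match d.get? ic.2 with
          | some p => d.insert ic.2 (p.1, ic.1)
          | none => d.insert ic.2 (ic.1, ic.1))
        PySem.Dict.empty)).items.map (·.2) from rfl]
    rw [dictB_items (x :: xs), hhead]
    simp only [List.map_cons, List.map_map, List.foldl_cons]
    have hmapeq : List.map ((fun (p : Char × Int × Int) => p.2) ∘
          (fun c => (c, ((fposC (x :: xs) c : Int), (lposC (x :: xs) c : Int)))))
          ((PySem.Set.ofList xs).discard x)
        = (((PySem.Set.ofList xs).discard x).map
            (fun c => (fposC (x :: xs) c, lposC (x :: xs) c))).map
            (fun p => ((p.1 : Int), (p.2 : Int))) := by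
      rw [List.map_map]
      rfl
    have hivs : ∀ p ∈ ((PySem.Set.ofList xs).discard x).map
        (fun c => (fposC (x :: xs) c, lposC (x :: xs) c)), p.1 ≤ p.2 := by
      intro p hp
      rcases List.mem_map.mp hp with ⟨c, hc, hpc⟩
      have hcl : c ∈ x :: xs := by
        have h1 : c ∈ PySem.Set.ofList (x :: xs) := by rw [hhead]; simp [hc]
        exact (PySem.Set.mem_ofList _ _).mp h1
      rw [← hpc]
      exact fposC_le_lposC hcl
    have hconv := convB (((PySem.Set.ofList xs).discard x).map
        (fun c => (fposC (x :: xs) c, lposC (x :: xs) c)))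
      (fposC (x :: xs) x) (lposC (x :: xs) x) [] hivs (by omega)
    simp only [List.nil_append] at hconv
    rw [hmapeq, hconv, hfx]
    have hmax : max 0 (lposC (x :: xs) x) = lposC (x :: xs) x := by omega
    rw [hmax]

theorem part_string_spec : Claim_equal_part_string := by
  intro s _
  show part_string s = part_string_alt s
  rw [part_string_A_eq, part_string_B_eq]
  rcases hl : s.toList with _ | ⟨x, xs⟩
  · rw [scanR]
    simp
  · have hhead : PySem.Set.ofList (x :: xs) = x :: (PySem.Set.ofList xs).discard x :=
      PySem.Set.ofList_cons x xs
    rw [hhead]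
    have hfx : fposC (x :: xs) x = 0 := by simp [fposC]
    have hcore := outer (x :: xs) ((PySem.Set.ofList xs).discard x) [] x 0 0
      (by rw [hhead]; simp) (by intro c hc; cases hc) (by simp) (by omega)
    rw [hfx] at hcore
    rw [hcore]
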